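-- pv_equiv track=rewrite | github.com/MedvedevSA/READ_SHEET | main.py | upd_dict_n_cnc
-- ===== SOURCE A (Python) =====
-- def upd_dict_n_cnc (list_2d):
--     new_dict = {"1":[],
--                 "2":[],
--                 "3":[]}
--
--     for index in range(0,len(list_2d[1])):
--         status_number = [ list_2d[0][index], list_2d[2][index]]
--
--         if list_2d[1][index] == "1":
--             new_dict["1"].append(status_number)
--         elif list_2d[1][index] == "2":
--             new_dict["2"].append(status_number)
--         elif list_2d[1][index] == "3":
--             new_dict["3"].append(status_number)
--     return new_dict
-- ===== SOURCE B (Python) =====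
-- def upd_dict_n_cnc(list_2d):
--     return {
--         key: [[list_2d[0][i], list_2d[2][i]]
--               for i in range(len(list_2d[1])) if list_2d[1][i] == key]
--         for key in ("1", "2", "3")
--     }
-- ===== Notes on version B (the rewrite author's own statement) =====
-- stated objective: idiomatic
-- what changed: Replaces A's single imperative pass that dispatches into a mutable dict through a 3-way elif chain by a dict comprehension over the fixed keys, building each group with an independent filtering comprehension per key.
import Mathlib
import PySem

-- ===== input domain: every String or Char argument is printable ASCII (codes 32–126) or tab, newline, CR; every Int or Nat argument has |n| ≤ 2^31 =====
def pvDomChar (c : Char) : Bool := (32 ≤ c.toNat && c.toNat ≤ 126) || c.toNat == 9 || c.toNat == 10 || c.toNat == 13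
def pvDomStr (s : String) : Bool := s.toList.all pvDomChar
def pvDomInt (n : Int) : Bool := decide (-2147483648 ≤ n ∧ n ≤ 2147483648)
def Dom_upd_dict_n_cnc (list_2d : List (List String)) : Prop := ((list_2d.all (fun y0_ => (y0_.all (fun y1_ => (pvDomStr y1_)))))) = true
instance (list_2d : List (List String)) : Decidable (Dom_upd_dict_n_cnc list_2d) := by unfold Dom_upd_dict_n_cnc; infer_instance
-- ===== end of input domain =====

-- B replaces A's single pass with a mutable dict and a 3-way elif chain by a dict
-- comprehension over the fixed keys, one filtering pass per key (idiomatic; same cost).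


-- ===== PORT A =====
-- the body of A's for-loop, named so the fold invariant can be stated about it
def updStep (list_2d : List (List String)) (d : PySem.Dict String (List (List String)))
    (index : Int) : PySem.Dict String (List (List String)) :=
  -- list_2d[0][index] / list_2d[2][index]: in range for every input Pre_ admits
  let status_number :=
    [PySem.List.pyGetD (PySem.List.pyGetD list_2d 0 []) index "",
     PySem.List.pyGetD (PySem.List.pyGetD list_2d 2 []) index ""]
  if PySem.List.pyGetD (PySem.List.pyGetD list_2d 1 []) index "" == "1" then
    d.modify "1" [] (fun l => l ++ [status_number])
  else if PySem.List.pyGetD (PySem.List.pyGetD list_2d 1 []) index "" == "2" then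
    d.modify "2" [] (fun l => l ++ [status_number])
  else if PySem.List.pyGetD (PySem.List.pyGetD list_2d 1 []) index "" == "3" then
    d.modify "3" [] (fun l => l ++ [status_number])
  else d

def upd_dict_n_cnc (list_2d : List (List String)) : List (String × List (List String)) :=
  let new_dict : PySem.Dict String (List (List String)) :=
    ((PySem.Dict.empty.insert "1" []).insert "2" []).insert "3" []
  let d :=
    (PySem.List.pyRange 0 (PySem.List.pyGetD list_2d 1 []).length 1).foldl
      (updStep list_2d) new_dict
  d.items

-- ===== PORT B =====
def upd_dict_n_cnc_alt (list_2d : List (List String)) : List (String × List (List String)) :=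
  ["1", "2", "3"].map (fun key =>
    (key,
     ((PySem.List.pyRange 0 (PySem.List.pyGetD list_2d 1 []).length 1).filter
        (fun i => PySem.List.pyGetD (PySem.List.pyGetD list_2d 1 []) i "" == key)).map
       (fun i => [PySem.List.pyGetD (PySem.List.pyGetD list_2d 0 []) i "",
                  PySem.List.pyGetD (PySem.List.pyGetD list_2d 2 []) i ""])))

-- ===== PRECONDITION & SPEC =====
-- Pre_ excludes exactly the inputs on which Python A raises IndexError: fewer than 2 rows,
-- or a non-empty status row with fewer than 3 rows or with row 0 / row 2 shorter than row 1.
def Pre_upd_dict_n_cnc (list_2d : List (List String)) : Prop :=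
  2 ≤ list_2d.length ∧
  ((PySem.List.pyGetD list_2d 1 []).length = 0 ∨
   (3 ≤ list_2d.length ∧
    (PySem.List.pyGetD list_2d 1 []).length ≤ (PySem.List.pyGetD list_2d 0 []).length ∧
    (PySem.List.pyGetD list_2d 1 []).length ≤ (PySem.List.pyGetD list_2d 2 []).length))
instance (list_2d : List (List String)) : Decidable (Pre_upd_dict_n_cnc list_2d) := by
  unfold Pre_upd_dict_n_cnc; infer_instance

def pvWitness_upd_dict_n_cnc : List (List String) :=
  [["a", "b"], ["1", "3"], ["x", "y"]]

def Spec_upd_dict_n_cnc (list_2d : List (List String)) (out : List (String × List (List String))) : Prop := out = upd_dict_n_cnc_alt list_2d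
instance (list_2d : List (List String)) (out : List (String × List (List String))) : Decidable (Spec_upd_dict_n_cnc list_2d out) := by unfold Spec_upd_dict_n_cnc; infer_instance

-- ===== CLAIM (what is proved, stated in full; the proofs are below) =====
def Claim_equal_upd_dict_n_cnc : Prop := ∀ (list_2d : List (List String)), Dom_upd_dict_n_cnc list_2d → Pre_upd_dict_n_cnc list_2d → Spec_upd_dict_n_cnc list_2d (upd_dict_n_cnc list_2d)

-- ===== LEMMAS AND PROOFS =====

-- the pair [list_2d[0][i], list_2d[2][i]] A and B both build
def pvPair (list_2d : List (List String)) (i : Int) : List String :=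
  [PySem.List.pyGetD (PySem.List.pyGetD list_2d 0 []) i "",
   PySem.List.pyGetD (PySem.List.pyGetD list_2d 2 []) i ""]

-- the status cell list_2d[1][i]
def pvStat (list_2d : List (List String)) (i : Int) : String :=
  PySem.List.pyGetD (PySem.List.pyGetD list_2d 1 []) i ""

theorem updStep_lit (list_2d : List (List String)) (a b c : List (List String)) (x : Int) :
    updStep list_2d (PySem.Dict.mk [("1", a), ("2", b), ("3", c)]) x =
      if pvStat list_2d x = "1" then
        PySem.Dict.mk [("1", a ++ [pvPair list_2d x]), ("2", b), ("3", c)]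
      else if pvStat list_2d x = "2" then
        PySem.Dict.mk [("1", a), ("2", b ++ [pvPair list_2d x]), ("3", c)]
      else if pvStat list_2d x = "3" then
        PySem.Dict.mk [("1", a), ("2", b), ("3", c ++ [pvPair list_2d x])]
      else PySem.Dict.mk [("1", a), ("2", b), ("3", c)] := by
  by_cases h1 : PySem.List.pyGetD (PySem.List.pyGetD list_2d 1 []) x "" = "1"
  · simp [updStep, pvStat, pvPair, h1, PySem.Dict.modify, PySem.Dict.getD, PySem.Dict.get?,
      PySem.Dict.contains, PySem.Dict.insert]
  · by_cases h2 : PySem.List.pyGetD (PySem.List.pyGetD list_2d 1 []) x "" = "2"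
    · simp [updStep, pvStat, pvPair, h2, PySem.Dict.modify, PySem.Dict.getD,
        PySem.Dict.get?, PySem.Dict.contains, PySem.Dict.insert]
    · by_cases h3 : PySem.List.pyGetD (PySem.List.pyGetD list_2d 1 []) x "" = "3"
      · simp [updStep, pvStat, pvPair, h3, PySem.Dict.modify, PySem.Dict.getD,
          PySem.Dict.get?, PySem.Dict.contains, PySem.Dict.insert]
      · simp [updStep, pvStat, h1, h2, h3]

-- fold invariant: A's loop appends to each key exactly B's per-key filtered list
theorem upd_fold_items (list_2d : List (List String)) (L : List Int)
    (a b c : List (List String)) :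
    (L.foldl (updStep list_2d) (PySem.Dict.mk [("1", a), ("2", b), ("3", c)])).items =
      [("1", a ++ (L.filter (fun i => pvStat list_2d i == "1")).map (pvPair list_2d)),
       ("2", b ++ (L.filter (fun i => pvStat list_2d i == "2")).map (pvPair list_2d)),
       ("3", c ++ (L.filter (fun i => pvStat list_2d i == "3")).map (pvPair list_2d))] := by
  induction L generalizing a b c with
  | nil => simp
  | cons x xs ih =>
    rw [List.foldl_cons, updStep_lit]
    by_cases h1 : pvStat list_2d x = "1"
    · rw [if_pos h1, ih]; simp [h1]
    · rw [if_neg h1]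
      by_cases h2 : pvStat list_2d x = "2"
      · rw [if_pos h2, ih]; simp [h2]
      · rw [if_neg h2]
        by_cases h3 : pvStat list_2d x = "3"
        · rw [if_pos h3, ih]; simp [h3]
        · rw [if_neg h3, ih]; simp [h1, h2, h3]

-- ===== VERDICT (by name: the statement is the Claim_ definition above) =====
theorem upd_dict_n_cnc_spec : Claim_equal_upd_dict_n_cnc := by
  intro list_2d _ _
  show upd_dict_n_cnc list_2d = upd_dict_n_cnc_alt list_2d
  unfold upd_dict_n_cnc upd_dict_n_cnc_alt
  have hinit : ((PySem.Dict.empty.insert "1" []).insert "2" []).insert "3"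
      ([] : List (List String)) = PySem.Dict.mk [("1", []), ("2", []), ("3", [])] := by
    decide
  simp only [hinit, upd_fold_items, List.nil_append, List.map_cons, List.map_nil]
  simp [pvStat, pvPair]
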